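-- pv_equiv track=rewrite | github.com/Zachvanmeter/810-Epicor-Submissions | 810ARSorter.py | GenInvoiceNum
-- ===== SOURCE A (Python) =====
-- def GenInvoiceNum(lines):		#invoiceNum, invoiceDate = GenInvoiceNum(lines)
-- 		#Parse all lines within the given .xml file
-- 	invoiceDate = ''
-- 	for line in lines:
-- 		if '<InvoiceNum>' in line:
-- 			invoiceNum = line.strip().replace('<InvoiceNum>','').replace('</InvoiceNum>','')
-- 			break
-- 	for line in lines:
-- 		if '<InvoiceDate>' in line:
-- 			invoiceDate = line.strip().replace('<InvoiceDate>','').replace('</InvoiceDate>','')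
-- 			break
-- 	return invoiceNum, invoiceDate
-- ===== SOURCE B (Python) =====
-- def GenInvoiceNum(lines):
--     # single pass with found-flags instead of two scans; UnboundLocalError if no InvoiceNum line, like A
--     invoiceDate = ''
--     numFound = False
--     dateFound = False
--     for line in lines:
--         if not numFound and '<InvoiceNum>' in line:
--             invoiceNum = line.strip().replace('<InvoiceNum>', '').replace('</InvoiceNum>', '')
--             numFound = True
--         if not dateFound and '<InvoiceDate>' in line:
--             invoiceDate = line.strip().replace('<InvoiceDate>', '').replace('</InvoiceDate>', '')
--             dateFound = True
--         if numFound and dateFound: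
--             break
--     return invoiceNum, invoiceDate
-- ===== Notes on version B (the rewrite author's own statement) =====
-- stated objective: simpler
-- what changed: Replaces A's two full scans of the lines (one per tag) by a single pass that captures the first InvoiceNum and first InvoiceDate line with found-flags and stops as soon as both are captured.
import Mathlib
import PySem

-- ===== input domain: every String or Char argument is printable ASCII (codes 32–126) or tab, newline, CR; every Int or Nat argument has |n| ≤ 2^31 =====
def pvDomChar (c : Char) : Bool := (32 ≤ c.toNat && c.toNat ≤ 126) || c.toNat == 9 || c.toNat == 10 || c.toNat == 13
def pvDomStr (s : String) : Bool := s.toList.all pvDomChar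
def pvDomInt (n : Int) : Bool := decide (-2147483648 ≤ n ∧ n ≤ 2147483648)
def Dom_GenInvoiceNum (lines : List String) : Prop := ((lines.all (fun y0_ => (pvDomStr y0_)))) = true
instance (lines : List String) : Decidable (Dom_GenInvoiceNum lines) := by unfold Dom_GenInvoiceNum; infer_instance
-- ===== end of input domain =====

-- B is a single pass with found-flags and an early break instead of A's two scans; equivalence is about the RETURN value on inputs where A returns (some line contains '<InvoiceNum>').

-- ===== PORT A =====
-- line.strip().replace('<InvoiceNum>','').replace('</InvoiceNum>','') (resp. Date)
def pvExtractNum (line : String) : String :=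
  PySem.Str.replace (PySem.Str.replace (PySem.Str.strip line) "<InvoiceNum>" "") "</InvoiceNum>" ""

def pvExtractDate (line : String) : String :=
  PySem.Str.replace (PySem.Str.replace (PySem.Str.strip line) "<InvoiceDate>" "") "</InvoiceDate>" ""

-- A's first loop: first line containing '<InvoiceNum>' (none = Python's UnboundLocalError, outside Pre_)
def pvFindNum : List String → Option String
  | [] => none
  | l :: ls => if PySem.Str.isIn "<InvoiceNum>" l then some (pvExtractNum l) else pvFindNum ls

-- A's second loop: first line containing '<InvoiceDate>' (none = invoiceDate stays '')
def pvFindDate : List String → Option String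
  | [] => none
  | l :: ls => if PySem.Str.isIn "<InvoiceDate>" l then some (pvExtractDate l) else pvFindDate ls

def GenInvoiceNum (lines : List String) : String × String :=
  ((pvFindNum lines).getD "", (pvFindDate lines).getD "")

-- ===== PORT B =====
-- Source B's single loop; state = (invoiceNum as Option for "unbound", invoiceDate, dateFound flag)
def pvAltLoop : List String → Option String → String → Bool → Option String × String
  | [], num, date, _ => (num, date)
  | l :: ls, num, date, df =>
    let num' := if !num.isSome && PySem.Str.isIn "<InvoiceNum>" l then some (pvExtractNum l) else num
    let dd : String × Bool := if !df && PySem.Str.isIn "<InvoiceDate>" l then (pvExtractDate l, true) else (date, df)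
    if num'.isSome && dd.2 then (num', dd.1) else pvAltLoop ls num' dd.1 dd.2

def GenInvoiceNum_alt (lines : List String) : String × String :=
  let r := pvAltLoop lines none "" false
  (r.1.getD "", r.2)

-- ===== PRECONDITION & SPEC =====
-- Pre_ excludes inputs with no line containing '<InvoiceNum>': there both Pythons raise UnboundLocalError.
def Pre_GenInvoiceNum (lines : List String) : Prop :=
  ∃ l ∈ lines, PySem.Str.isIn "<InvoiceNum>" l = true
instance (lines : List String) : Decidable (Pre_GenInvoiceNum lines) := by unfold Pre_GenInvoiceNum; infer_instance

def pvWitness_GenInvoiceNum : List String := ["<InvoiceNum>7</InvoiceNum>", "<InvoiceDate>2020-01-01</InvoiceDate>"]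

def Spec_GenInvoiceNum (lines : List String) (out : String × String) : Prop := out = GenInvoiceNum_alt lines
instance (lines : List String) (out : String × String) : Decidable (Spec_GenInvoiceNum lines out) := by unfold Spec_GenInvoiceNum; infer_instance

-- ===== CLAIM (what is proved, stated in full; the proofs are below) =====
def Claim_equal_GenInvoiceNum : Prop := ∀ (lines : List String), Dom_GenInvoiceNum lines → Pre_GenInvoiceNum lines → Spec_GenInvoiceNum lines (GenInvoiceNum lines)

-- ===== LEMMAS AND PROOFS =====

-- once the date is captured (df = true) only the num scan continues
lemma pvAltLoop_date_done : ∀ (ls : List String) (d : String),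
    pvAltLoop ls none d true = (pvFindNum ls, d) := by
  intro ls
  induction ls with
  | nil => intro d; simp [pvAltLoop, pvFindNum]
  | cons l ls ih =>
    intro d
    by_cases h : PySem.Str.isIn "<InvoiceNum>" l
    all_goals simp only [pvAltLoop, pvFindNum]
    all_goals simp at h
    · simp [h]
    · simp [h, ih]

-- once the num is captured only the date scan continues
lemma pvAltLoop_num_done : ∀ (ls : List String) (n : String) (d : String),
    pvAltLoop ls (some n) d false = (some n, (pvFindDate ls).getD d) := by
  intro ls
  induction ls with
  | nil => intro n d; simp [pvAltLoop, pvFindDate]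
  | cons l ls ih =>
    intro n d
    by_cases h : PySem.Str.isIn "<InvoiceDate>" l
    all_goals simp only [pvAltLoop, pvFindDate]
    all_goals simp at h
    · simp [h]
    · simp [h, ih]

-- the single pass computes the first match for each tag
lemma pvAltLoop_spec : ∀ (ls : List String) (d : String),
    pvAltLoop ls none d false = (pvFindNum ls, (pvFindDate ls).getD d) := by
  intro ls
  induction ls with
  | nil => intro d; simp [pvAltLoop, pvFindNum, pvFindDate]
  | cons l ls ih =>
    intro d
    by_cases hn : PySem.Str.isIn "<InvoiceNum>" l
    all_goals by_cases hd : PySem.Str.isIn "<InvoiceDate>" l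
    all_goals simp only [pvAltLoop, pvFindNum, pvFindDate]
    all_goals simp at hn hd
    · simp [hn, hd]
    · simp [hn, hd, pvAltLoop_num_done]
    · simp [hn, hd, pvAltLoop_date_done]
    · simp [hn, hd, ih]

-- ===== VERDICT (by name: the statement is the Claim_ definition above) =====
theorem GenInvoiceNum_spec : Claim_equal_GenInvoiceNum := by
  intro lines _ _
  unfold Spec_GenInvoiceNum GenInvoiceNum GenInvoiceNum_alt
  rw [pvAltLoop_spec]
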